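-- pv_equiv track=rewrite | github.com/welikeheon/little-by-little | (100) Programmers/Level3/ immigration_check.py | solution
-- ===== SOURCE A (Python) =====
-- def solution(n, times):
--     min_time = 1
--     max_time = max(times) * n
--     answer = 0
--
--     while min_time <= max_time:
--         mid_time = (min_time + max_time) // 2
--         checked_people = 0
--         for t in times:
--             checked_people += mid_time // t
--             if checked_people >= n: # if an examiner with t time is enough,
--                 break
--             # else we need to use every examiner to check every person
--
--         if checked_people < n:  # mid_time is not sufficient to check every person
--             min_time = mid_time + 1 # find out the bigger time
--         else:   # mid_time was sufficient to check every person
--             max_time = mid_time - 1 # find out the smaller time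
--             answer = mid_time   # remember the last possible time
--     return answer
-- ===== SOURCE B (Python) =====
-- def solution(n, times):
--     hi = max(times) * n
--     if hi < 1:
--         return 0
--     step = 1
--     while step <= hi:
--         step *= 2
--     done = 0
--     while step >= 1:
--         cand = done + step
--         if cand <= hi and sum(cand // t for t in times) < n:
--             done = cand
--         step //= 2
--     return done + 1
-- ===== Notes on version B (the rewrite author's own statement) =====
-- stated objective: alternative
-- what changed: A's iterative lo/hi binary search with an early-break partial-capacity scan is replaced by a bit-descent search: double a step past max(times)*n, then greedily add halving steps while the candidate time stays infeasible (exact capacity sum), returning last-infeasible+1.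
-- outside the precondition, e.g. on solution(3, [2, -1]): A returns 6, B returns 7; on solution(2, [0, 5]): A raises ZeroDivisionError, B raises ZeroDivisionError
import Mathlib
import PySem

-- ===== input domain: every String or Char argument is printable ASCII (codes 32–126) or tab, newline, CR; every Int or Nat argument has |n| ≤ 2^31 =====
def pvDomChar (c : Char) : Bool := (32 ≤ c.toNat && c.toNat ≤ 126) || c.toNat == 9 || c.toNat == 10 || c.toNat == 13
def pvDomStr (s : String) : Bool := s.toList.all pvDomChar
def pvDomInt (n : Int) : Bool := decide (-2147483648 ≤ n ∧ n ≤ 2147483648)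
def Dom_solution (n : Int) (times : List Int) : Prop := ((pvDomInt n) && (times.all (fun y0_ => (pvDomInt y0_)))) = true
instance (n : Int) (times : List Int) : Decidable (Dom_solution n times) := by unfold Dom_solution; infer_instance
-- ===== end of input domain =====

-- B replaces A's iterative lo/hi binary search with early-break capacity scan by a
-- bit-descent search (double a step past the bound, then greedily add halving steps
-- while the candidate stays infeasible); objective: alternative, same asymptotic cost.

-- ===== PORT A =====
-- for t in times: checked += mid // t; if checked >= n: break
def solCheck (mid : Int) (n : Int) : List Int → Int → Int
  | [], acc => acc
  | t :: ts, acc =>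
      let acc' := acc + PySem.Int.floordiv mid t
      if acc' ≥ n then acc' else solCheck mid n ts acc'

-- while min_time <= max_time: …
def solWhile (n : Int) (times : List Int) (lo hi ans : Int) : Int :=
  if h : lo ≤ hi then
    let mid := PySem.Int.floordiv (lo + hi) 2
    let checked := solCheck mid n times 0
    if checked < n then solWhile n times (mid + 1) hi ans
    else solWhile n times lo (mid - 1) mid
  else ans
termination_by (hi + 1 - lo).toNat
decreasing_by
  · have := PySem.Int.floordiv_two_mid_bounds h; omega
  · have := PySem.Int.floordiv_two_mid_bounds h; omega

def solution (n : Int) (times : List Int) : Int :=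
  match PySem.List.max? times (fun t => t) with
  | none => 0   -- Python: max([]) raises ValueError; excluded by Pre_solution
  | some m => solWhile n times 1 (m * n) 0

-- ===== PORT B =====
-- sum(cand // t for t in times)
def solCap (mid : Int) (times : List Int) : Int :=
  (times.map (fun t => PySem.Int.floordiv mid t)).sum

-- while step <= hi: step *= 2   (the '1 ≤ step' part of the guard is only for
-- termination; the caller passes step = 1 and doubling keeps it positive)
def solDouble (hi step : Int) : Int :=
  if _h : 1 ≤ step ∧ step ≤ hi then solDouble hi (step * 2) else step
termination_by (hi + 1 - step).toNat
decreasing_by omega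

-- while step >= 1: cand = done + step; if cand <= hi and cap(cand) < n: done = cand; step //= 2
def solBits (n hi : Int) (times : List Int) (done step : Int) : Int :=
  if h : 1 ≤ step then
    solBits n hi times
      (if done + step ≤ hi ∧ solCap (done + step) times < n then done + step else done)
      (PySem.Int.floordiv step 2)
  else done
termination_by step.toNat
decreasing_by
  have : PySem.Int.floordiv step 2 = step / 2 :=
    PySem.Int.floordiv_eq_ediv_of_pos (by omega)
  omega

def solution_alt (n : Int) (times : List Int) : Int :=
  match PySem.List.max? times (fun t => t) with
  | none => 0   -- Python: max([]) raises ValueError; excluded by Pre_solution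
  | some m =>
      if m * n < 1 then 0
      else solBits n (m * n) times 0 (solDouble (m * n) 1) + 1

-- ===== PRECONDITION & SPEC =====
-- Pre_ excludes empty times (max([]) raises ValueError in both programs) and inputs with a
-- nonpositive examiner time whose search loop actually runs (max(times)*n ≥ 1): a zero time
-- there raises ZeroDivisionError in both, and negative times lie outside the problem's
-- natural domain, where A's early-break partial sum is an accident of its loop order.
def Pre_solution (n : Int) (times : List Int) : Prop :=
  times ≠ [] ∧ ((∀ t ∈ times, 0 < t) ∨ n = 0 ∨ (n < 0 ∧ ∃ t ∈ times, 0 ≤ t))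
instance (n : Int) (times : List Int) : Decidable (Pre_solution n times) := by
  unfold Pre_solution; infer_instance

def pvWitness_solution : Int × List Int := (6, [7, 10])

def Spec_solution (n : Int) (times : List Int) (out : Int) : Prop := out = solution_alt n times
instance (n : Int) (times : List Int) (out : Int) : Decidable (Spec_solution n times out) := by
  unfold Spec_solution; infer_instance

-- ===== CLAIM (what is proved, stated in full; the proofs are below) =====
def Claim_equal_solution : Prop := ∀ (n : Int) (times : List Int), Dom_solution n times → Pre_solution n times → Spec_solution n times (solution n times)

-- ===== LEMMAS AND PROOFS =====

theorem solCap_nonneg (mid : Int) (hm : 0 ≤ mid) :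
    ∀ (ts : List Int), (∀ t ∈ ts, 0 < t) → 0 ≤ solCap mid ts := by
  intro ts hpos
  induction ts with
  | nil => simp [solCap]
  | cons t ts ih =>
      have h1 : 0 ≤ PySem.Int.floordiv mid t := by
        rw [PySem.Int.floordiv_eq_ediv_of_pos (hpos t (by simp))]
        exact Int.ediv_nonneg hm (le_of_lt (hpos t (by simp)))
      have h2 := ih (fun t ht => hpos t (by simp [ht]))
      simp only [solCap, List.map_cons, List.sum_cons] at *
      omega

-- A's early-break scan is below n iff the exact capacity sum is below n
theorem solCheck_lt_iff (mid n : Int) (hm : 0 ≤ mid) :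
    ∀ (ts : List Int) (acc : Int), (∀ t ∈ ts, 0 < t) →
      (solCheck mid n ts acc < n ↔ acc + solCap mid ts < n) := by
  intro ts
  induction ts with
  | nil => intro acc _; simp [solCheck, solCap]
  | cons t ts ih =>
      intro acc hpos
      have hrest : ∀ t' ∈ ts, 0 < t' := fun t' ht' => hpos t' (by simp [ht'])
      have hcap : 0 ≤ solCap mid ts := solCap_nonneg mid hm ts hrest
      simp only [solCheck, solCap, List.map_cons, List.sum_cons]
      split_ifs with hb
      · simp only [solCap] at hcap
        constructor
        · intro h; omega
        · intro h; omega
      · rw [ih (acc + PySem.Int.floordiv mid t) hrest]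
        simp only [solCap] at hcap ⊢
        omega

theorem solCap_mono (a b : Int) (hab : a ≤ b) (ts : List Int) (hpos : ∀ t ∈ ts, 0 < t) :
    solCap a ts ≤ solCap b ts := by
  induction ts with
  | nil => simp [solCap]
  | cons t ts ih =>
      have ht : 0 < t := hpos t (by simp)
      have h1 : PySem.Int.floordiv a t ≤ PySem.Int.floordiv b t := by
        rw [PySem.Int.floordiv_eq_ediv_of_pos ht, PySem.Int.floordiv_eq_ediv_of_pos ht]
        exact Int.ediv_le_ediv ht hab
      have h2 := ih (fun t' ht' => hpos t' (by simp [ht']))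
      simp only [solCap, List.map_cons, List.sum_cons] at *
      omega

theorem solCap_zero (ts : List Int) (hpos : ∀ t ∈ ts, 0 < t) : solCap 0 ts = 0 := by
  induction ts with
  | nil => simp [solCap]
  | cons t ts ih =>
      have h1 : PySem.Int.floordiv 0 t = 0 := by
        rw [PySem.Int.floordiv_eq_ediv_of_pos (hpos t (by simp))]
        exact Int.zero_ediv t
      have h2 := ih (fun t' ht' => hpos t' (by simp [ht']))
      simp only [solCap, List.map_cons, List.sum_cons] at *
      omega

-- max(times)*n people can always be processed within max(times)*n time
theorem solCap_max_feas (n m : Int) (ts : List Int) (hm : m ∈ ts)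
    (hpos : ∀ t ∈ ts, 0 < t) (hn : 1 ≤ n) : n ≤ solCap (m * n) ts := by
  have hm0 : 0 < m := hpos m hm
  have hmn : 0 ≤ m * n := mul_nonneg (by omega) (by omega)
  have hterm : PySem.Int.floordiv (m * n) m = n := by
    rw [PySem.Int.floordiv_eq_ediv_of_pos hm0]
    exact Int.mul_ediv_cancel_left n (by omega)
  have hmem : n ∈ ts.map (fun t => PySem.Int.floordiv (m * n) t) :=
    List.mem_map.mpr ⟨m, hm, hterm⟩
  refine List.single_le_sum ?_ n hmem
  intro x hx
  rcases List.mem_map.mp hx with ⟨t, ht, rfl⟩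
  rw [PySem.Int.floordiv_eq_ediv_of_pos (hpos t ht)]
  exact Int.ediv_nonneg hmn (le_of_lt (hpos t ht))

-- A's loop returns the least feasible time, given the invariants
theorem solWhile_min (n : Int) (times : List Int) (hpos : ∀ t ∈ times, 0 < t) (hn : 1 ≤ n) :
    ∀ (k : Nat) (lo hi ans : Int), (hi + 1 - lo).toNat ≤ k → 1 ≤ lo → lo ≤ hi + 1 →
      (∀ T, 1 ≤ T → T < lo → solCap T times < n) →
      ((ans = hi + 1 ∧ n ≤ solCap ans times) ∨ (ans = 0 ∧ n ≤ solCap hi times)) →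
      1 ≤ solWhile n times lo hi ans ∧ n ≤ solCap (solWhile n times lo hi ans) times ∧
        ∀ T, 1 ≤ T → T < solWhile n times lo hi ans → solCap T times < n := by
  intro k
  induction k with
  | zero =>
      intro lo hi ans hk hlo hle hmin hans
      by_cases hc : lo ≤ hi
      · exfalso; omega
      · rw [solWhile.eq_def, dif_neg hc]
        rcases hans with ⟨h1, h2⟩ | ⟨h1, h2⟩
        · exact ⟨by omega, h2, fun T hT1 hT2 => hmin T hT1 (by omega)⟩
        · exfalso
          by_cases hhi : 1 ≤ hi
          · exact absurd h2 (not_le.mpr (hmin hi hhi (by omega)))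
          · have h0 : hi = 0 := by omega
            rw [h0, solCap_zero times hpos] at h2; omega
  | succ k ih =>
      intro lo hi ans hk hlo hle hmin hans
      by_cases hc : lo ≤ hi
      · rw [solWhile.eq_def, dif_pos hc]
        dsimp only
        have hmid := PySem.Int.floordiv_two_mid_bounds hc
        set mid := PySem.Int.floordiv (lo + hi) 2 with hmiddef
        have hiff := solCheck_lt_iff mid n (by omega) times 0 hpos
        split_ifs with hch
        · have hcap : solCap mid times < n := by have := hiff.mp hch; omega
          exact ih (mid + 1) hi ans (by omega) (by omega) (by omega)
            (fun T hT1 hT2 => by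
              by_cases hT : T < lo
              · exact hmin T hT1 hT
              · have := solCap_mono T mid (by omega) times hpos
                omega)
            hans
        · have hcap : n ≤ solCap mid times := by
            by_contra h; exact hch (hiff.mpr (by omega))
          exact ih lo (mid - 1) mid (by omega) hlo (by omega) hmin (Or.inl ⟨by omega, hcap⟩)
      · rw [solWhile.eq_def, dif_neg hc]
        rcases hans with ⟨h1, h2⟩ | ⟨h1, h2⟩
        · exact ⟨by omega, h2, fun T hT1 hT2 => hmin T hT1 (by omega)⟩
        · exfalso
          by_cases hhi : 1 ≤ hi
          · exact absurd h2 (not_le.mpr (hmin hi hhi (by omega)))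
          · have h0 : hi = 0 := by omega
            rw [h0, solCap_zero times hpos] at h2; omega

-- the doubling loop yields a power of two strictly above hi
theorem solDouble_spec (hi : Int) :
    ∀ (k : Nat) (s : Int), (hi + 1 - s).toNat ≤ k → 1 ≤ s → (∃ j : Nat, s = 2 ^ j) →
      (∃ j : Nat, solDouble hi s = 2 ^ j) ∧ hi < solDouble hi s := by
  intro k
  induction k with
  | zero =>
      intro s hk hs hj
      have hgt : hi < s := by omega
      rw [solDouble.eq_def, dif_neg (by omega)]
      exact ⟨hj, hgt⟩
  | succ k ih =>
      intro s hk hs hj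
      by_cases hc : 1 ≤ s ∧ s ≤ hi
      · rw [solDouble.eq_def, dif_pos hc]
        rcases hj with ⟨j, rfl⟩
        exact ih _ (by omega) (by omega) ⟨j + 1, by rw [pow_succ]⟩
      · rw [solDouble.eq_def, dif_neg hc]
        exact ⟨hj, by omega⟩

-- the bit-descent loop ends at the largest infeasible time
theorem solBits_spec (n hi : Int) (times : List Int) (hpos : ∀ t ∈ times, 0 < t)
    (hhi : n ≤ solCap hi times) :
    ∀ (j : Nat) (d : Int), 0 ≤ d → solCap d times < n → n ≤ solCap (d + 2 * 2 ^ j) times →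
      0 ≤ solBits n hi times d (2 ^ j) ∧ solCap (solBits n hi times d (2 ^ j)) times < n ∧
        n ≤ solCap (solBits n hi times d (2 ^ j) + 1) times := by
  intro j
  induction j with
  | zero =>
      intro d hd hdlt hdf
      simp only [pow_zero, mul_one] at hdf ⊢
      rw [solBits.eq_def, dif_pos (by norm_num : (1:Int) ≤ 1)]
      have hstep : PySem.Int.floordiv (1 : Int) 2 = 0 := by
        rw [PySem.Int.floordiv_eq_ediv_of_pos (by norm_num)]; norm_num
      rw [hstep, solBits.eq_def, dif_neg (by norm_num : ¬ (1:Int) ≤ 0)]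
      split_ifs with hadv
      · exact ⟨by omega, hadv.2, by
          have : d + 1 + 1 = d + 2 := by ring
          rw [this]; exact hdf⟩
      · refine ⟨hd, hdlt, ?_⟩
        rcases not_and_or.mp hadv with h | h
        · exact le_trans hhi (solCap_mono hi (d + 1) (by omega) times hpos)
        · omega
  | succ j ih =>
      intro d hd hdlt hdf
      have hp : (0:Int) < 2 ^ (j + 1) := pow_pos (by norm_num) _
      have h2j : (0:Int) < 2 ^ j := pow_pos (by norm_num) _
      rw [solBits.eq_def, dif_pos (by omega)]
      have hstep : PySem.Int.floordiv ((2:Int) ^ (j + 1)) 2 = 2 ^ j := by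
        rw [PySem.Int.floordiv_eq_ediv_of_pos (by norm_num), pow_succ]
        exact Int.mul_ediv_cancel _ (by norm_num)
      rw [hstep]
      by_cases hadv : d + 2 ^ (j + 1) ≤ hi ∧ solCap (d + 2 ^ (j + 1)) times < n
      · rw [if_pos hadv]
        refine ih (d + 2 ^ (j + 1)) (by omega) hadv.2 ?_
        have heq : d + 2 ^ (j + 1) + 2 * 2 ^ j = d + 2 * 2 ^ (j + 1) := by
          rw [pow_succ]; ring
        rw [heq]; exact hdf
      · rw [if_neg hadv]
        refine ih d hd hdlt ?_
        have heq : d + 2 * 2 ^ j = d + 2 ^ (j + 1) := by rw [pow_succ]; ring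
        rw [heq]
        rcases not_and_or.mp hadv with h | h
        · exact le_trans hhi (solCap_mono hi (d + 2 ^ (j + 1)) (by omega) times hpos)
        · omega

-- ===== VERDICT (by name: the statement is the Claim_ definition above) =====
theorem solution_spec : Claim_equal_solution := by
  intro n times _ hpre
  unfold Spec_solution solution solution_alt
  cases hmax : PySem.List.max? times (fun t => t) with
  | none => rfl
  | some m =>
      dsimp only
      rcases hpre.2 with hpos | hn0 | ⟨hn, t, ht, ht0⟩
      · by_cases hn : 1 ≤ n
        · have hmem : m ∈ times := PySem.List.max?_mem hmax
          have hm0 : 0 < m := hpos m hmem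
          have hhi1 : 1 ≤ m * n := by
            have : 1 * 1 ≤ m * n := mul_le_mul (by omega) (by omega) (by omega) (by omega)
            omega
          have hfeas : n ≤ solCap (m * n) times := solCap_max_feas n m times hmem hpos hn
          rw [if_neg (by omega)]
          obtain ⟨hA1, hA2, hA3⟩ :=
            solWhile_min n times hpos hn (m * n).toNat 1 (m * n) 0 (by omega) le_rfl
              (by omega) (fun T h1 h2 => absurd h2 (by omega)) (Or.inr ⟨rfl, hfeas⟩)
          obtain ⟨⟨j, hjeq⟩, hjgt⟩ :=
            solDouble_spec (m * n) (m * n).toNat 1 (by omega) le_rfl ⟨0, by norm_num⟩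
          rw [hjeq]
          have h2j : (0:Int) < 2 ^ j := pow_pos (by norm_num) _
          rw [hjeq] at hjgt
          obtain ⟨hB0, hB1, hB2⟩ :=
            solBits_spec n (m * n) times hpos hfeas j 0 le_rfl
              (by rw [solCap_zero times hpos]; omega)
              (le_trans hfeas (solCap_mono (m * n) (0 + 2 * 2 ^ j) (by omega) times hpos))
          set rA := solWhile n times 1 (m * n) 0 with hrA
          set dB := solBits n (m * n) times 0 (2 ^ j) with hdB
          rcases lt_trichotomy rA (dB + 1) with h | h | h
          · exfalso
            have := solCap_mono rA dB (by omega) times hpos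
            omega
          · exact h
          · exfalso
            have := hA3 (dB + 1) (by omega) (by omega)
            omega
        · -- n ≤ 0 with positive times: the search range [1, m*n] is empty
          have hmem : m ∈ times := PySem.List.max?_mem hmax
          have hm0 : 0 < m := hpos m hmem
          have hle : m * n ≤ 0 := mul_nonpos_of_nonneg_of_nonpos (by omega) (by omega)
          rw [solWhile.eq_def, dif_neg (by omega : ¬ (1:Int) ≤ m * n), if_pos (by omega)]
      · subst hn0
        rw [solWhile.eq_def]
        norm_num
      · have hm : t ≤ m := PySem.List.max?_isMax hmax t ht
        have hle : m * n ≤ 0 := mul_nonpos_of_nonneg_of_nonpos (by omega) (by omega)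
        rw [solWhile.eq_def, dif_neg (by omega : ¬ (1:Int) ≤ m * n), if_pos (by omega)]
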